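-- pv_equiv track=rewrite | github.com/Ushi0406/- | 知能プログラミング演習２/run_rl.py | build_simple_instructions
-- ===== SOURCE A (Python) =====
-- def build_simple_instructions(nodes_xy, path, max_steps=20):
--     """
--     ノードIDと曲がり方向で簡易な避難指示を作る。
--     - 直進/右折/左折/Uターンを判定
--     - 方角（東西南北）も補助的に出す
--     """
--     if not path or len(path) < 2:
--         return ["経路が短すぎて指示を生成できません。"]
--
--     def dir_from_delta(dx, dy):
--         if abs(dx) >= abs(dy):
--             return "東" if dx > 0 else "西"
--         return "南" if dy > 0 else "北"
--
--     def heading_from_vec(v):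
--         dx, dy = v
--         if abs(dx) >= abs(dy):
--             return "東" if dx > 0 else "西"
--         return "南" if dy > 0 else "北"
--
--     def turn_from_headings(h1, h2):
--         order = ["北", "東", "南", "西"]
--         i1 = order.index(h1)
--         i2 = order.index(h2)
--         diff = (i2 - i1) % 4
--         if diff == 0:
--             return "直進"
--         if diff == 2:
--             return "Uターン"
--         return "右折" if diff == 1 else "左折"
--
--     instr = [f"開始: ノード {path[0]}"]
--
--     # 方向が同じ区間はまとめる
--     prev_vec = None
--     prev_heading = None
--     run_start = path[0]
--     run_dir = None
--     run_turn = None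
--
--     def flush_run(end_node):
--         if run_dir is None:
--             return
--         if run_turn is None:
--             instr.append(f"{run_start} → {end_node}: {run_dir}へ進む")
--         else:
--             instr.append(f"{run_start} で{run_turn}し、{run_dir}へ直進して {end_node} まで")
--
--     limit = min(len(path), max_steps + 1)
--     for i in range(1, limit):
--         u = path[i - 1]
--         v = path[i]
--         x1, y1 = nodes_xy[u]
--         x2, y2 = nodes_xy[v]
--         vec = (x2 - x1, y2 - y1)
--         direction = heading_from_vec(vec)
--
--         if run_dir is None:
--             run_start = u
--             run_dir = direction
--             run_turn = None if prev_heading is None else turn_from_headings(prev_heading, direction)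
--         elif direction != run_dir:
--             flush_run(u)
--             run_start = u
--             run_dir = direction
--             run_turn = None if prev_heading is None else turn_from_headings(prev_heading, direction)
--
--         prev_vec = vec
--         prev_heading = direction
--
--     # 最後の区間を出力
--     flush_run(path[limit - 1])
--
--     if len(path) > max_steps + 1:
--         instr.append("...（経路が長いため一部省略）")
--     instr.append(f"到着: ノード {path[-1]}")
--     return instr
-- ===== SOURCE B (Python) =====
-- from itertools import groupby
--
--
-- def build_simple_instructions(nodes_xy, path, max_steps=20):
--     """Edges -> groupby runs -> emit, instead of A's stateful run-tracking loop."""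
--     if not path or len(path) < 2:
--         return ["経路が短すぎて指示を生成できません。"]
--
--     def heading(u, v):
--         x1, y1 = nodes_xy[u]
--         x2, y2 = nodes_xy[v]
--         dx, dy = x2 - x1, y2 - y1
--         if abs(dx) >= abs(dy):
--             return "東" if dx > 0 else "西"
--         return "南" if dy > 0 else "北"
--
--     # number of edges kept (instructions are truncated after max_steps edges)
--     k = max(0, min(len(path), max_steps + 1) - 1)
--     edges = [(u, v, heading(u, v)) for u, v in zip(path, path[1:k + 1])]
--
--     # collapse consecutive equal-heading edges into runs (start, end, heading)
--     runs = []
--     for h, grp in groupby(edges, key=lambda e: e[2]):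
--         grp = list(grp)
--         runs.append((grp[0][0], grp[-1][1], h))
--
--     order = ["北", "東", "南", "西"]
--     turn_name = ["直進", "右折", "Uターン", "左折"]
--     instr = [f"開始: ノード {path[0]}"]
--     for idx, (s, e, h) in enumerate(runs):
--         if idx == 0:
--             instr.append(f"{s} → {e}: {h}へ進む")
--         else:
--             t = turn_name[(order.index(h) - order.index(runs[idx - 1][2])) % 4]
--             instr.append(f"{s} で{t}し、{h}へ直進して {e} まで")
--     if len(path) > max_steps + 1:
--         instr.append("...（経路が長いため一部省略）")
--     instr.append(f"到着: ノード {path[-1]}")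
--     return instr
-- ===== Notes on version B (the rewrite author's own statement) =====
-- stated objective: alternative
-- what changed: A tracks runs with mutable loop state (run_start/run_dir/run_turn, flush_run closure) in one pass; B first builds the truncated edge list with headings, collapses it into runs with itertools.groupby, then emits the instruction lines from the run list.
import Mathlib
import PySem

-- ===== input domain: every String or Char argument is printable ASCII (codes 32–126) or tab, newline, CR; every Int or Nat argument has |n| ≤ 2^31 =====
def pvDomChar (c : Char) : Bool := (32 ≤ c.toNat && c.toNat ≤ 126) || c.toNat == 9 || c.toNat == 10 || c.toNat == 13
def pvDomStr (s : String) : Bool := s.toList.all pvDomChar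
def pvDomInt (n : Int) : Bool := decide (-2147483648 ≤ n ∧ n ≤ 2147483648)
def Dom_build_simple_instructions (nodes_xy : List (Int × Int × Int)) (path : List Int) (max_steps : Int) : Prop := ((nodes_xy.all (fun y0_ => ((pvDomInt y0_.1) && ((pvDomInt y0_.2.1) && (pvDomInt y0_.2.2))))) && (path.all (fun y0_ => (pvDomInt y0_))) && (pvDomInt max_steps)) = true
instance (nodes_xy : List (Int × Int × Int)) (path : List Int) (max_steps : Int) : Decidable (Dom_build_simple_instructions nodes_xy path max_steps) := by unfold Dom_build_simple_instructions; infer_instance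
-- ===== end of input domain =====

-- ===== PORT A =====
-- B is the same instruction builder decomposed as edges → groupby runs → emit,
-- replacing A's single stateful run-tracking loop (objective: alternative decomposition).
-- Helpers shared by both ports (both Python versions contain this heading / index logic verbatim).
def pvHeading (dx dy : Int) : String :=
  if dy.natAbs ≤ dx.natAbs then (if 0 < dx then "東" else "西")
  else (if 0 < dy then "南" else "北")

def pvOrderIdx (h : String) : Int :=
  ((PySem.List.index? ["北", "東", "南", "西"] h).map (fun n => (n : Int))).getD 0

-- A's turn_from_headings (if-chain on the index difference)
def pvTurnA (h1 h2 : String) : String :=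
  let diff := PySem.Int.mod (pvOrderIdx h2 - pvOrderIdx h1) 4
  if diff = 0 then "直進"
  else if diff = 2 then "Uターン"
  else if diff = 1 then "右折" else "左折"

def pvFmtGo (s : Int) (d : String) (e : Int) : String :=
  PySem.Int.toStr s ++ " → " ++ PySem.Int.toStr e ++ ": " ++ d ++ "へ進む"

def pvFmtTurn (s : Int) (t d : String) (e : Int) : String :=
  PySem.Int.toStr s ++ " で" ++ t ++ "し、" ++ d ++ "へ直進して " ++ PySem.Int.toStr e ++ " まで"

-- A's loop state: (instr, prev_heading, run_start, run_dir, run_turn)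
structure pvAState where
  instr : List String
  prevHeading : Option String
  runStart : Int
  runDir : Option String
  runTurn : Option String

-- A's flush_run(end_node)
def pvFlush (instr : List String) (runStart : Int) (runDir runTurn : Option String) (endNode : Int) : List String :=
  match runDir with
  | none => instr
  | some d =>
    match runTurn with
    | none => instr ++ [pvFmtGo runStart d endNode]
    | some t => instr ++ [pvFmtTurn runStart t d endNode]

-- one iteration of A's for-loop (i runs over range(1, limit))
def pvAStep (nodes_xy : List (Int × Int × Int)) (path : List Int) (st : pvAState) (i : Int) : pvAState :=
  let u := PySem.List.pyGetD path (i - 1) 0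
  let v := PySem.List.pyGetD path i 0
  let p1 := (PySem.Dict.get? (PySem.Dict.mk nodes_xy) u).getD (0, 0)
  let p2 := (PySem.Dict.get? (PySem.Dict.mk nodes_xy) v).getD (0, 0)
  let vec := (p2.1 - p1.1, p2.2 - p1.2)
  let direction := pvHeading vec.1 vec.2
  let st' :=
    match st.runDir with
    | none =>
      { st with runStart := u, runDir := some direction,
                runTurn := st.prevHeading.map (fun ph => pvTurnA ph direction) }
    | some d =>
      if direction ≠ d then
        { st with instr := pvFlush st.instr st.runStart st.runDir st.runTurn u,
                  runStart := u, runDir := some direction,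
                  runTurn := st.prevHeading.map (fun ph => pvTurnA ph direction) }
      else st
  { st' with prevHeading := some direction }

def build_simple_instructions (nodes_xy : List (Int × Int × Int)) (path : List Int) (max_steps : Int) : List String :=
  if path.length < 2 then ["経路が短すぎて指示を生成できません。"]
  else
    let instr0 := ["開始: ノード " ++ PySem.Int.toStr (PySem.List.pyGetD path 0 0)]
    let limit : Int := min (path.length : Int) (max_steps + 1)
    let st := (PySem.List.pyRange 1 limit 1).foldl (pvAStep nodes_xy path)
      { instr := instr0, prevHeading := none, runStart := PySem.List.pyGetD path 0 0,
        runDir := none, runTurn := none }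
    let instr1 := pvFlush st.instr st.runStart st.runDir st.runTurn (PySem.List.pyGetD path (limit - 1) 0)
    let instr2 := if (path.length : Int) > max_steps + 1 then instr1 ++ ["...（経路が長いため一部省略）"] else instr1
    instr2 ++ ["到着: ノード " ++ PySem.Int.toStr (PySem.List.pyGetD path (-1) 0)]

-- ===== PORT B =====
-- Source B's heading(u, v)
def pvEdgeHeading (nodes_xy : List (Int × Int × Int)) (u v : Int) : String :=
  let p1 := (PySem.Dict.get? (PySem.Dict.mk nodes_xy) u).getD (0, 0)
  let p2 := (PySem.Dict.get? (PySem.Dict.mk nodes_xy) v).getD (0, 0)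
  pvHeading (p2.1 - p1.1) (p2.2 - p1.2)

-- Source B's groupby loop: collapse consecutive equal-heading edges into (start, end, heading) runs
def pvCollapse : Int → Int → String → List (Int × Int × String) → List (Int × Int × String)
  | s, e, h, [] => [(s, e, h)]
  | s, e, h, (u, v, h') :: rest =>
    if h' = h then pvCollapse s v h rest
    else (s, e, h) :: pvCollapse u v h' rest

def pvRuns : List (Int × Int × String) → List (Int × Int × String)
  | [] => []
  | (u, v, h) :: rest => pvCollapse u v h rest

-- Source B's turn: table lookup turn_name[(order.index(h) - order.index(prev)) % 4]
def pvTurnB (ph h : String) : String :=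
  (PySem.List.pyGet? ["直進", "右折", "Uターン", "左折"]
    (PySem.Int.mod (pvOrderIdx h - pvOrderIdx ph) 4)).getD ""

-- Source B's emission loop over enumerate(runs): first run "へ進む", later runs turn from previous run's heading
def pvEmitTail : String → List (Int × Int × String) → List String
  | _, [] => []
  | ph, (s, e, h) :: rest => pvFmtTurn s (pvTurnB ph h) h e :: pvEmitTail h rest

def pvEmit : List (Int × Int × String) → List String
  | [] => []
  | (s, e, h) :: rest => pvFmtGo s h e :: pvEmitTail h rest

def build_simple_instructions_alt (nodes_xy : List (Int × Int × Int)) (path : List Int) (max_steps : Int) : List String :=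
  if path.length < 2 then ["経路が短すぎて指示を生成できません。"]
  else
    let k : Int := max 0 (min (path.length : Int) (max_steps + 1) - 1)
    let edges := (path.zip (PySem.List.slice path (some 1) (some (k + 1)))).map
      (fun p => (p.1, p.2, pvEdgeHeading nodes_xy p.1 p.2))
    let runs := pvRuns edges
    let instr := ("開始: ノード " ++ PySem.Int.toStr (PySem.List.pyGetD path 0 0)) :: pvEmit runs
    let instr2 := if (path.length : Int) > max_steps + 1 then instr ++ ["...（経路が長いため一部省略）"] else instr
    instr2 ++ ["到着: ノード " ++ PySem.Int.toStr (PySem.List.pyGetD path (-1) 0)]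

-- ===== PRECONDITION & SPEC =====
-- Pre_ excludes exactly the inputs where Python A raises: an IndexError when max_steps < -len(path)
-- (path[limit-1] out of range), and a KeyError when a node among the first limit path entries
-- is missing from nodes_xy while the loop runs (limit ≥ 2).
def Pre_build_simple_instructions (nodes_xy : List (Int × Int × Int)) (path : List Int) (max_steps : Int) : Prop :=
  2 ≤ path.length →
    (-(path.length : Int) ≤ max_steps ∧
      (2 ≤ min (path.length : Int) (max_steps + 1) →
        ∀ x ∈ path.take (min (path.length : Int) (max_steps + 1)).toNat,
          (PySem.Dict.get? (PySem.Dict.mk nodes_xy) x).isSome = true))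
instance (nodes_xy : List (Int × Int × Int)) (path : List Int) (max_steps : Int) : Decidable (Pre_build_simple_instructions nodes_xy path max_steps) := by unfold Pre_build_simple_instructions; infer_instance

def pvWitness_build_simple_instructions : (List (Int × Int × Int)) × List Int × Int :=
  ([(0, 0, 0), (1, 2, 0), (2, 2, 3)], [0, 1, 2], 20)

def Spec_build_simple_instructions (nodes_xy : List (Int × Int × Int)) (path : List Int) (max_steps : Int) (out : List String) : Prop := out = build_simple_instructions_alt nodes_xy path max_steps
instance (nodes_xy : List (Int × Int × Int)) (path : List Int) (max_steps : Int) (out : List String) : Decidable (Spec_build_simple_instructions nodes_xy path max_steps out) := by unfold Spec_build_simple_instructions; infer_instance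

-- ===== CLAIM (what is proved, stated in full; the proofs are below) =====
def Claim_equal_build_simple_instructions : Prop := ∀ (nodes_xy : List (Int × Int × Int)) (path : List Int) (max_steps : Int), Dom_build_simple_instructions nodes_xy path max_steps → Pre_build_simple_instructions nodes_xy path max_steps → Spec_build_simple_instructions nodes_xy path max_steps (build_simple_instructions nodes_xy path max_steps)

-- ===== LEMMAS AND PROOFS =====

-- Source B's table lookup computes exactly A's if-chain on the index difference
theorem pvTurnB_eq (ph h : String) : pvTurnB ph h = pvTurnA ph h := by
  unfold pvTurnB pvTurnA
  have h1 : 0 ≤ PySem.Int.mod (pvOrderIdx h - pvOrderIdx ph) 4 := PySem.Int.mod_nonneg _ (by norm_num)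
  have h2 : PySem.Int.mod (pvOrderIdx h - pvOrderIdx ph) 4 < 4 := PySem.Int.mod_lt _ (by norm_num)
  set d := PySem.Int.mod (pvOrderIdx h - pvOrderIdx ph) 4 with hd
  have : d = 0 ∨ d = 1 ∨ d = 2 ∨ d = 3 := by omega
  rcases this with h0 | h0 | h0 | h0 <;> rw [h0] <;> rfl

-- proof-side: g j = path[j] with default, the edge starting at index j
def pvG (path : List Int) (j : Int) : Int := PySem.List.pyGetD path j 0

def pvEdgeAt (nodes_xy : List (Int × Int × Int)) (path : List Int) (j : Nat) : Int × Int × String :=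
  (pvG path j, pvG path (j + 1), pvEdgeHeading nodes_xy (pvG path j) (pvG path (j + 1)))

-- step on an explicit edge (u, v, h) instead of an index
def pvAStepE (st : pvAState) (e : Int × Int × String) : pvAState :=
  let st' :=
    match st.runDir with
    | none =>
      { st with runStart := e.1, runDir := some e.2.2,
                runTurn := st.prevHeading.map (fun ph => pvTurnA ph e.2.2) }
    | some d =>
      if e.2.2 ≠ d then
        { st with instr := pvFlush st.instr st.runStart st.runDir st.runTurn e.1,
                  runStart := e.1, runDir := some e.2.2,
                  runTurn := st.prevHeading.map (fun ph => pvTurnA ph e.2.2) }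
      else st
  { st' with prevHeading := some e.2.2 }

def pvFmtOpt (s : Int) (t : Option String) (d : String) (e : Int) : String :=
  match t with
  | none => pvFmtGo s d e
  | some t' => pvFmtTurn s t' d e

-- the instructions A emits from a mid-run state (run start s, last node e, dir d, pending turn t)
def pvAloop : Int → Int → String → Option String → List (Int × Int × String) → List String
  | s, e, d, t, [] => [pvFmtOpt s t d e]
  | s, _, d, t, (u, v, h) :: rest =>
    if h = d then pvAloop s v d t rest
    else pvFmtOpt s t d u :: pvAloop u v h (some (pvTurnA d h)) rest

-- B's emission with an optional pending turn for the head run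
def pvEmitOpt (t : Option String) : List (Int × Int × String) → List String
  | [] => []
  | (s, e, h) :: rest => pvFmtOpt s t h e :: pvEmitTail h rest

-- consecutive edges: each edge starts where the previous one ended
def pvChained : Int → List (Int × Int × String) → Prop
  | _, [] => True
  | e, (u, v, _) :: rest => u = e ∧ pvChained v rest

def pvLastV : Int → List (Int × Int × String) → Int
  | e, [] => e
  | _, (_, v, _) :: rest => pvLastV v rest

theorem pvCollapse_shape (es : List (Int × Int × String)) (s e : Int) (d : String) :
    ∃ e' tl, pvCollapse s e d es = (s, e', d) :: tl := by
  induction es generalizing s e d with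
  | nil => exact ⟨e, [], rfl⟩
  | cons x rest ih =>
    obtain ⟨u, v, h'⟩ := x
    by_cases hh : h' = d
    · simpa [pvCollapse, hh] using ih s v d
    · exact ⟨e, pvCollapse u v h' rest, by simp [pvCollapse, hh]⟩

theorem pvEmitTail_collapse (es : List (Int × Int × String)) (s e : Int) (d ph : String) :
    pvEmitTail ph (pvCollapse s e d es) = pvEmitOpt (some (pvTurnB ph d)) (pvCollapse s e d es) := by
  obtain ⟨e', tl, heq⟩ := pvCollapse_shape es s e d
  rw [heq]
  rfl

-- main run lemma: A's mid-run emission = B's emission of the collapsed runs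
theorem pvAloop_eq_emit (es : List (Int × Int × String)) (s e : Int) (d : String)
    (t : Option String) (hch : pvChained e es) :
    pvAloop s e d t es = pvEmitOpt t (pvCollapse s e d es) := by
  induction es generalizing s e d t with
  | nil => rfl
  | cons x rest ih =>
    obtain ⟨u, v, h⟩ := x
    obtain ⟨hu, hch'⟩ := hch
    subst hu
    by_cases hh : h = d
    · subst hh
      simp only [pvAloop, pvCollapse]
      exact ih s v h t hch'
    · simp only [pvAloop, pvCollapse, if_neg hh, pvEmitOpt]
      rw [ih u v h (some (pvTurnA d h)) hch', pvEmitTail_collapse, pvTurnB_eq]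

-- A's fold from a mid-run state, then the final flush, appends exactly pvAloop
theorem pvFlush_some (instr : List String) (s : Int) (d : String) (t : Option String) (e : Int) :
    pvFlush instr s (some d) t e = instr ++ [pvFmtOpt s t d e] := by
  cases t <;> rfl

theorem pvFold_flush (es : List (Int × Int × String)) (instr : List String) (s e : Int)
    (d : String) (t : Option String) :
    pvFlush (es.foldl pvAStepE { instr := instr, prevHeading := some d, runStart := s, runDir := some d, runTurn := t }).instr
      (es.foldl pvAStepE { instr := instr, prevHeading := some d, runStart := s, runDir := some d, runTurn := t }).runStart
      (es.foldl pvAStepE { instr := instr, prevHeading := some d, runStart := s, runDir := some d, runTurn := t }).runDir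
      (es.foldl pvAStepE { instr := instr, prevHeading := some d, runStart := s, runDir := some d, runTurn := t }).runTurn
      (pvLastV e es)
      = instr ++ pvAloop s e d t es := by
  induction es generalizing instr s e d t with
  | nil =>
    simp only [List.foldl_nil, pvLastV, pvAloop, pvFlush_some]
  | cons x rest ih =>
    obtain ⟨u, v, h⟩ := x
    by_cases hh : h = d
    · subst hh
      have hstep : pvAStepE { instr := instr, prevHeading := some h, runStart := s, runDir := some h, runTurn := t } (u, v, h)
          = { instr := instr, prevHeading := some h, runStart := s, runDir := some h, runTurn := t } := by
        simp [pvAStepE]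
      simp only [List.foldl_cons, hstep, pvLastV, pvAloop]
      exact ih instr s v h t
    · have hstep : pvAStepE { instr := instr, prevHeading := some d, runStart := s, runDir := some d, runTurn := t } (u, v, h)
          = { instr := instr ++ [pvFmtOpt s t d u], prevHeading := some h, runStart := u, runDir := some h, runTurn := some (pvTurnA d h) } := by
        simp [pvAStepE, hh, pvFlush_some]
      simp only [List.foldl_cons, hstep, pvLastV, pvAloop, if_neg hh]
      rw [ih (instr ++ [pvFmtOpt s t d u]) u v h (some (pvTurnA d h))]
      simp

theorem pvEmitOpt_none (rs : List (Int × Int × String)) : pvEmitOpt none rs = pvEmit rs := by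
  cases rs with
  | nil => rfl
  | cons x rest => obtain ⟨a, b, c⟩ := x; rfl

theorem pvChained_range' (nodes_xy : List (Int × Int × Int)) (path : List Int) :
    ∀ (m a : Nat), pvChained (pvG path a) ((List.range' a m).map (pvEdgeAt nodes_xy path))
  | 0, _ => trivial
  | m + 1, a => ⟨rfl, pvChained_range' nodes_xy path m (a + 1)⟩

theorem pvLastV_range' (nodes_xy : List (Int × Int × Int)) (path : List Int) :
    ∀ (m a : Nat), pvLastV (pvG path a) ((List.range' a m).map (pvEdgeAt nodes_xy path)) = pvG path (a + m) := by
  intro m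
  induction m with
  | zero => intro a; simp [pvLastV]
  | succ m ih =>
    intro a
    rw [List.range'_succ, List.map_cons]
    show pvLastV (pvG path ((a : Int) + 1)) _ = _
    have h1 : ((a : Int) + 1) = ((a + 1 : Nat) : Int) := by push_cast; ring
    have h2 : ((a : Int) + ((m + 1 : Nat) : Int)) = (((a + 1 : Nat) : Int) + (m : Int)) := by push_cast; ring
    rw [h1, h2]
    exact ih (a + 1)

theorem pvAStep_shift (nodes_xy : List (Int × Int × Int)) (path : List Int) (st : pvAState) (j : Nat) :
    pvAStep nodes_xy path st (1 + (j : Int)) = pvAStepE st (pvEdgeAt nodes_xy path j) := by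
  have h2 : (1 : Int) + (j : Int) = ((j : Nat) : Int) + 1 := by ring
  have h3 : ((j : Nat) : Int) + 1 - 1 = ((j : Nat) : Int) := by ring
  simp only [pvAStep, pvAStepE, pvEdgeAt, pvEdgeHeading, pvG, h2, h3]

theorem pvZip_edges (nodes_xy : List (Int × Int × Int)) (path : List Int) (k : Nat)
    (hk : k + 1 ≤ path.length) :
    (path.zip ((path.drop 1).take k)).map (fun p => (p.1, p.2, pvEdgeHeading nodes_xy p.1 p.2))
      = (List.range' 0 k).map (pvEdgeAt nodes_xy path) := by
  have hzip : path.zip ((path.drop 1).take k)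
      = (List.range' 0 k).map (fun (j : Nat) => (pvG path (j : Int), pvG path ((j : Int) + 1))) := by
    apply List.ext_getElem
    · simp
      omega
    · intro i h1 h2
      have hi : i < k := by simpa using h2
      have hiu : i < path.length := by omega
      have hiv : i + 1 < path.length := by omega
      have e1 : pvG path ((i : Nat) : Int) = path[i] := by
        rw [pvG, PySem.List.pyGetD_natCast]
        simp [hiu]
      have e2 : pvG path (((i : Nat) : Int) + 1) = path[i + 1] := by
        have h0 : (0 : Int) ≤ (i : Int) + 1 := by positivity
        have hlt : (i : Int) + 1 < (path.length : Int) := by exact_mod_cast hiv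
        rw [pvG, PySem.List.pyGetD_eq_getElem path 0 h0 hlt]
        simp only [show ((i : Int) + 1).toNat = i + 1 from by omega]
      simp [List.getElem_zip, List.getElem_take, e1, e2]
  rw [hzip, List.map_map]
  rfl

-- ===== VERDICT (by name: the statement is the Claim_ definition above) =====
theorem build_simple_instructions_spec : Claim_equal_build_simple_instructions := by
  intro nodes_xy path max_steps _ _
  show build_simple_instructions nodes_xy path max_steps = build_simple_instructions_alt nodes_xy path max_steps
  unfold build_simple_instructions build_simple_instructions_alt
  by_cases hlen : path.length < 2
  · simp [hlen]
  · simp only [if_neg hlen]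
    have hn2 : 2 ≤ path.length := by omega
    set L : Int := min (path.length : Int) (max_steps + 1) with hLdef
    set k : Nat := (L - 1).toNat with hkdef
    have hLle : L ≤ (path.length : Int) := min_le_left _ _
    have hmax : max 0 (L - 1) = (k : Int) := by omega
    have hk1 : k + 1 ≤ path.length := by omega
    have hslice : PySem.List.slice path (some 1) (some ((k : Int) + 1)) = (path.drop 1).take k := by
      rw [PySem.List.slice_toNat path (by norm_num) (by positivity)]
      norm_num
    rw [hmax, hslice, pvZip_edges nodes_xy path k hk1]
    rw [PySem.List.pyRange_one]
    rw [show ((L - 1).toNat) = k from rfl]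
    rw [List.range_eq_range']
    rw [List.foldl_map]
    simp only [pvAStep_shift]
    rw [← List.foldl_map (f := pvEdgeAt nodes_xy path) (g := pvAStepE)]
    cases hk : k with
    | zero =>
      simp [pvRuns, pvEmit, pvFlush]
    | succ m =>
      rw [List.range'_succ, List.map_cons, List.foldl_cons]
      have hstep0 : ∀ (ins : List String) (rs : Int) (e : Int × Int × String),
          pvAStepE { instr := ins, prevHeading := none, runStart := rs, runDir := none, runTurn := none } e
            = { instr := ins, prevHeading := some e.2.2, runStart := e.1, runDir := some e.2.2, runTurn := none } := by
        intro ins rs e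
        simp [pvAStepE]
      rw [hstep0]
      have hL1 : L - 1 = ((1 : Nat) : Int) + ((m : Nat) : Int) := by omega
      have hend : PySem.List.pyGetD path (L - 1) 0
          = pvLastV (pvG path ((1 : Nat) : Int)) ((List.range' (0 + 1) m).map (pvEdgeAt nodes_xy path)) := by
        rw [show (0 + 1) = 1 from rfl, pvLastV_range' nodes_xy path m 1]
        show PySem.List.pyGetD path (L - 1) 0 = PySem.List.pyGetD path _ 0
        rw [hL1]
      rw [hend, pvFold_flush]
      have hch : pvChained (pvG path ((1 : Nat) : Int)) ((List.range' (0 + 1) m).map (pvEdgeAt nodes_xy path)) := by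
        rw [show (0 + 1) = 1 from rfl]
        exact pvChained_range' nodes_xy path m 1
      rw [pvAloop_eq_emit _ _ _ _ _ hch, pvEmitOpt_none]
      have hruns : pvRuns (pvEdgeAt nodes_xy path 0 :: (List.range' (0 + 1) m).map (pvEdgeAt nodes_xy path))
          = pvCollapse (pvEdgeAt nodes_xy path 0).1 (pvG path ((1 : Nat) : Int)) (pvEdgeAt nodes_xy path 0).2.2
              ((List.range' (0 + 1) m).map (pvEdgeAt nodes_xy path)) := by
        simp [pvRuns, pvEdgeAt]
      rw [hruns]
      simp
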